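-- pv_equiv track=rewrite | github.com/adigunner47/startup25 | streamlit_app.py | parse_research_prompts
-- ===== SOURCE A (Python) =====
-- def parse_research_prompts(content):
--     # Split the content into sections
--     sections = {}
--     current_section = None
--     current_prompts = []
--
--     lines = content.split('\n')
--     i = 0
--     while i < len(lines):
--         line = lines[i]
--         # Check for section headers which use ## pattern
--         if line.startswith('## '):
--             if current_section:
--                 sections[current_section] = current_prompts
--             current_section = line.replace('## ', '').strip()
--             current_prompts = []
--         # Check for subsection headers which use ### pattern
--         elif line.startswith('### '):
--             prompt_title = line.replace('### ', '').strip()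
--             prompt_number = ""  # No specific numbering in research paper format
--
--             # Find the prompt content (bullet points that follow)
--             i += 1
--             prompt_content = ""
--             while i < len(lines) and not (lines[i].startswith('##') or lines[i].startswith('# ')):
--                 if lines[i].strip():
--                     # Include all bullet points and text under this subsection
--                     prompt_content += lines[i] + '\n'
--                 i += 1
--             i -= 1  # Adjust for next iteration
--
--             # Add to the current section
--             if prompt_content.strip():
--                 current_prompts.append((prompt_number, prompt_title, prompt_content))
--         i += 1
--
--     # Add the last section
--     if current_section:
--         sections[current_section] = current_prompts
--
--     return sections
-- ===== SOURCE B (Python) =====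
-- def parse_research_prompts(content):
--     # Single-pass state machine over the lines: no index arithmetic, a pending
--     # (title, text) buffer replaces the nested content-scanning loop.
--     sections = {}
--     current_section = None
--     current_prompts = []
--     pending = None  # (title, accumulated text) of the subsection being read
--
--     def flushed(prompts, pending):
--         if pending is not None and pending[1].strip():
--             return prompts + [("", pending[0], pending[1])]
--         return prompts
--
--     for line in content.split('\n'):
--         if line.startswith('## '):
--             current_prompts = flushed(current_prompts, pending)
--             pending = None
--             if current_section:
--                 sections[current_section] = current_prompts
--             current_section = line.replace('## ', '').strip()
--             current_prompts = []
--         elif line.startswith('### '):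
--             current_prompts = flushed(current_prompts, pending)
--             pending = (line.replace('### ', '').strip(), "")
--         elif line.startswith('##') or line.startswith('# '):
--             current_prompts = flushed(current_prompts, pending)
--             pending = None
--         elif pending is not None and line.strip():
--             pending = (pending[0], pending[1] + line + '\n')
--
--     current_prompts = flushed(current_prompts, pending)
--     if current_section:
--         sections[current_section] = current_prompts
--     return sections
-- ===== Notes on version B (the rewrite author's own statement) =====
-- stated objective: simpler
-- what changed: Replaced the manual-index while-loop with a nested content-scanning inner loop and i-=1 backtracking by a flat single-pass state machine over the lines that keeps a pending (title, text) buffer and flushes it at each header/EOF.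
import Mathlib
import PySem

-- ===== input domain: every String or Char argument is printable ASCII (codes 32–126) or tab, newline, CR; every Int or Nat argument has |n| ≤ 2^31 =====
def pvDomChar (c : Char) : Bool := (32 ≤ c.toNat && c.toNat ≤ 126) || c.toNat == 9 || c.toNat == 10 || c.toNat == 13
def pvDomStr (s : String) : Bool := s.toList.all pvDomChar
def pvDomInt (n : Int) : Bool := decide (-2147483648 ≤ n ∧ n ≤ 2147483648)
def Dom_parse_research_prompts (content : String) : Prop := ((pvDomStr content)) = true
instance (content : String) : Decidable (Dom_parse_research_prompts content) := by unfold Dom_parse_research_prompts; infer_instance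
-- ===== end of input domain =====

-- B replaces A's manual-index while-loop (with its nested content-scanning inner loop and
-- i -= 1 backtracking) by a flat single-pass state machine with a pending-prompt buffer:
-- simpler decomposition, same O(n) cost.

-- ===== PORT A =====
-- inner while loop of A: collects prompt content from index i until a '##'/'# ' line or EOF;
-- returns (prompt_content, final i)
def pvInnerA (lines : List String) (i : Nat) (acc : String) : String × Nat :=
  if h : i < lines.length then
    let l := lines[i]
    if PySem.Str.startswith l "##" || PySem.Str.startswith l "# " then (acc, i)
    else pvInnerA lines (i + 1) (if PySem.Str.strip l ≠ "" then acc ++ l ++ "\n" else acc)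
  else (acc, i)
termination_by lines.length - i

-- the inner loop never moves the index backwards (cited by pvOuterA's decreasing_by)
theorem pvInnerA_ge (lines : List String) (i : Nat) (acc : String) :
    i ≤ (pvInnerA lines i acc).2 := by
  induction hk : lines.length - i using Nat.strong_induction_on generalizing i acc with
  | _ k ih =>
    rw [pvInnerA]
    dsimp only
    split
    · split
      · exact le_refl i
      · refine Nat.le_trans (Nat.le_succ i) (ih (lines.length - (i + 1)) (by omega) _ _ rfl)
    · exact le_refl i

-- outer while loop of A (after the inner loop A does i -= 1 then i += 1, so it resumes at
-- exactly the index the inner loop stopped at)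
def pvOuterA (lines : List String) (i : Nat) (sec : Option String)
    (prompts : List (String × String × String))
    (sections : PySem.Dict String (List (String × String × String))) :
    PySem.Dict String (List (String × String × String)) :=
  if h : i < lines.length then
    let line := lines[i]
    if PySem.Str.startswith line "## " then
      let sections' := match sec with
        | some s => if s ≠ "" then sections.insert s prompts else sections
        | none => sections
      pvOuterA lines (i + 1) (some (PySem.Str.strip (PySem.Str.replace line "## " ""))) [] sections'
    else if PySem.Str.startswith line "### " then
      let title := PySem.Str.strip (PySem.Str.replace line "### " "")
      let r := pvInnerA lines (i + 1) ""
      pvOuterA lines r.2 sec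
        (if PySem.Str.strip r.1 ≠ "" then prompts ++ [("", title, r.1)] else prompts) sections
    else pvOuterA lines (i + 1) sec prompts sections
  else
    match sec with
    | some s => if s ≠ "" then sections.insert s prompts else sections
    | none => sections
termination_by lines.length - i
decreasing_by
  · omega
  · have := pvInnerA_ge lines (i + 1) ""
    omega
  · omega

def parse_research_prompts (content : String) : List (String × List (String × String × String)) :=
  (pvOuterA ((PySem.Str.split? content "\n").getD []) 0 none [] PySem.Dict.empty).items

-- ===== PORT B =====
-- B's state: (sections, current_section, current_prompts, pending (title, text))
def pvStoreB (sections : PySem.Dict String (List (String × String × String)))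
    (sec : Option String) (prompts : List (String × String × String)) :
    PySem.Dict String (List (String × String × String)) :=
  match sec with
  | some s => if s ≠ "" then sections.insert s prompts else sections
  | none => sections

def pvFlushB (prompts : List (String × String × String)) (pending : Option (String × String)) :
    List (String × String × String) :=
  match pending with
  | some p => if PySem.Str.strip p.2 ≠ "" then prompts ++ [("", p.1, p.2)] else prompts
  | none => prompts

def pvStepB
    (st : PySem.Dict String (List (String × String × String)) × Option String ×
          List (String × String × String) × Option (String × String)) (line : String) :
    PySem.Dict String (List (String × String × String)) × Option String ×
      List (String × String × String) × Option (String × String) :=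
  let (sections, sec, prompts, pending) := st
  if PySem.Str.startswith line "## " then
    (pvStoreB sections sec (pvFlushB prompts pending),
     some (PySem.Str.strip (PySem.Str.replace line "## " "")), [], none)
  else if PySem.Str.startswith line "### " then
    (sections, sec, pvFlushB prompts pending,
     some (PySem.Str.strip (PySem.Str.replace line "### " ""), ""))
  else if PySem.Str.startswith line "##" || PySem.Str.startswith line "# " then
    (sections, sec, pvFlushB prompts pending, none)
  else
    match pending with
    | some p =>
        if PySem.Str.strip line ≠ "" then (sections, sec, prompts, some (p.1, p.2 ++ line ++ "\n"))
        else st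
    | none => st

def pvFinB
    (st : PySem.Dict String (List (String × String × String)) × Option String ×
          List (String × String × String) × Option (String × String)) :
    PySem.Dict String (List (String × String × String)) :=
  pvStoreB st.1 st.2.1 (pvFlushB st.2.2.1 st.2.2.2)

def parse_research_prompts_alt (content : String) :
    List (String × List (String × String × String)) :=
  (pvFinB (((PySem.Str.split? content "\n").getD []).foldl pvStepB
    (PySem.Dict.empty, none, [], none))).items

-- ===== PRECONDITION & SPEC =====
def Spec_parse_research_prompts (content : String) (out : List (String × List (String × String × String))) : Prop := out = parse_research_prompts_alt content
instance (content : String) (out : List (String × List (String × String × String))) : Decidable (Spec_parse_research_prompts content out) := by unfold Spec_parse_research_prompts; infer_instance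

-- ===== CLAIM (what is proved, stated in full; the proofs are below) =====
def Claim_equal_parse_research_prompts : Prop := ∀ (content : String), Dom_parse_research_prompts content → Spec_parse_research_prompts content (parse_research_prompts content)

-- ===== LEMMAS AND PROOFS =====

-- startswith is monotone in the prefix: used to derive the generic-terminator facts
theorem pvSWmono {l : String} (p q : String) (hpq : p.toList <+: q.toList)
    (h : PySem.Str.startswith l q = true) : PySem.Str.startswith l p = true := by
  simp only [PySem.Str.startswith_eq, PySem.Chars.startswith_iff] at *
  exact hpq.trans h

-- on a line that ends A's inner loop, B's step first flushes the pending prompt;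
-- flushing before or inside the step gives the same state
theorem pvStepB_flush (secs : PySem.Dict String (List (String × String × String)))
    (sec : Option String) (pr : List (String × String × String)) (p : String × String)
    (line : String)
    (hterm : (PySem.Str.startswith line "##" || PySem.Str.startswith line "# ") = true) :
    pvStepB (secs, sec, pr, some p) line = pvStepB (secs, sec, pvFlushB pr (some p), none) line := by
  by_cases h1 : PySem.Str.startswith line "## " = true
  · simp only [pvStepB]
    rw [if_pos h1, if_pos h1]
    rfl
  · by_cases h2 : PySem.Str.startswith line "### " = true
    · simp only [pvStepB]
      rw [if_neg h1, if_neg h1, if_pos h2, if_pos h2]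
      rfl
    · simp only [pvStepB]
      rw [if_neg h1, if_neg h1, if_neg h2, if_neg h2, if_pos hterm, if_pos hterm]
      rfl

-- main invariant: A's outer loop from index i equals B's fold over the remaining lines with
-- no pending prompt (first conjunct), and A's inner loop followed by the prompt-flush and the
-- outer loop equals B's fold with a pending (t, acc) buffer (second conjunct)
theorem pvMain (lines : List String) : ∀ (k i : Nat), lines.length - i = k →
    ∀ (sec : Option String) (pr : List (String × String × String))
      (secs : PySem.Dict String (List (String × String × String))) (t acc : String),
    (pvOuterA lines i sec pr secs
        = pvFinB ((lines.drop i).foldl pvStepB (secs, sec, pr, none)))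
    ∧ (pvOuterA lines (pvInnerA lines i acc).2 sec
          (pvFlushB pr (some (t, (pvInnerA lines i acc).1))) secs
        = pvFinB ((lines.drop i).foldl pvStepB (secs, sec, pr, some (t, acc)))) := by
  intro k
  induction k using Nat.strong_induction_on with
  | _ k ih =>
    intro i hk
    have hcong : ∀ (rest : List String)
        (s1 s2 : PySem.Dict String (List (String × String × String)) × Option String ×
          List (String × String × String) × Option (String × String)), s1 = s2 →
        pvFinB (rest.foldl pvStepB s1) = pvFinB (rest.foldl pvStepB s2) := by
      intro rest s1 s2 hh
      rw [hh]
    by_cases h : i < lines.length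
    · have hdrop : lines.drop i = lines[i] :: lines.drop (i + 1) := List.drop_eq_getElem_cons h
      have hk' : lines.length - (i + 1) < k := by omega
      -- first conjunct, for every state
      have H1 : ∀ (sec : Option String) (pr : List (String × String × String))
          (secs : PySem.Dict String (List (String × String × String))),
          pvOuterA lines i sec pr secs
            = pvFinB ((lines.drop i).foldl pvStepB (secs, sec, pr, none)) := by
        intro sec pr secs
        rw [pvOuterA.eq_def]
        dsimp only
        rw [dif_pos h, hdrop, List.foldl_cons]
        by_cases h1 : PySem.Str.startswith lines[i] "## " = true
        · rw [if_pos h1, (ih _ hk' (i + 1) rfl _ _ _ "" "").1]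
          refine hcong _ _ _ ?_
          simp only [pvStepB]
          rw [if_pos h1]
          rfl
        · rw [if_neg h1]
          by_cases h2 : PySem.Str.startswith lines[i] "### " = true
          · rw [if_pos h2]
            have h5 := (ih _ hk' (i + 1) rfl sec pr secs
              (PySem.Str.strip (PySem.Str.replace lines[i] "### " "")) "").2
            refine Eq.trans (Eq.trans rfl h5) (hcong _ _ _ ?_)
            simp only [pvStepB]
            rw [if_neg h1, if_pos h2]
            rfl
          · rw [if_neg h2, (ih _ hk' (i + 1) rfl sec pr secs "" "").1]
            refine hcong _ _ _ ?_
            simp only [pvStepB]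
            rw [if_neg h1, if_neg h2]
            by_cases h3 : (PySem.Str.startswith lines[i] "##"
                || PySem.Str.startswith lines[i] "# ") = true
            · rw [if_pos h3]
              rfl
            · rw [if_neg h3]
      refine fun sec pr secs t acc => ⟨H1 sec pr secs, ?_⟩
      -- second conjunct
      rw [pvInnerA.eq_def]
      dsimp only
      rw [dif_pos h]
      by_cases hterm : (PySem.Str.startswith lines[i] "##"
          || PySem.Str.startswith lines[i] "# ") = true
      · rw [if_pos hterm]
        refine Eq.trans (H1 sec (pvFlushB pr (some (t, acc))) secs) ?_
        rw [hdrop, List.foldl_cons, List.foldl_cons]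
        exact hcong _ _ _ (pvStepB_flush secs sec pr (t, acc) lines[i] hterm).symm
      · rw [if_neg hterm]
        have hor : (PySem.Str.startswith lines[i] "##"
            || PySem.Str.startswith lines[i] "# ") = false := by
          cases hx : (PySem.Str.startswith lines[i] "##"
              || PySem.Str.startswith lines[i] "# ")
          · rfl
          · exact absurd hx hterm
        have hnb : PySem.Str.startswith lines[i] "##" = false ∧
            PySem.Str.startswith lines[i] "# " = false := by
          constructor <;> (cases hx : PySem.Str.startswith lines[i] "##") <;>
            (cases hy : PySem.Str.startswith lines[i] "# ") <;> simp_all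
        have h1 : ¬ PySem.Str.startswith lines[i] "## " = true := by
          intro hx
          exact absurd (pvSWmono "##" "## " (by decide) hx) (by rw [hnb.1]; exact Bool.false_ne_true)
        have h2 : ¬ PySem.Str.startswith lines[i] "### " = true := by
          intro hx
          exact absurd (pvSWmono "##" "### " (by decide) hx) (by rw [hnb.1]; exact Bool.false_ne_true)
        rw [(ih _ hk' (i + 1) rfl sec pr secs t
          (if PySem.Str.strip lines[i] ≠ "" then acc ++ lines[i] ++ "\n" else acc)).2]
        rw [hdrop, List.foldl_cons]
        refine hcong _ _ _ ?_
        simp only [pvStepB]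
        rw [if_neg h1, if_neg h2, if_neg hterm]
        by_cases hs : PySem.Str.strip lines[i] ≠ ""
        · rw [if_pos hs, if_pos hs]
        · rw [if_neg hs, if_neg hs]
    · intro sec pr secs t acc
      have hdrop : lines.drop i = [] := List.drop_eq_nil_of_le (by omega)
      constructor
      · rw [pvOuterA.eq_def]
        dsimp only
        rw [dif_neg h, hdrop]
        cases sec <;> rfl
      · rw [pvInnerA.eq_def]
        dsimp only
        rw [dif_neg h, pvOuterA.eq_def]
        dsimp only
        rw [dif_neg h, hdrop]
        cases sec <;> rfl

theorem parse_research_prompts_spec_aux (content : String) :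
    parse_research_prompts content = parse_research_prompts_alt content := by
  unfold parse_research_prompts parse_research_prompts_alt
  have h := (pvMain ((PySem.Str.split? content "\n").getD [])
      (((PySem.Str.split? content "\n").getD []).length) 0 rfl none [] PySem.Dict.empty "" "").1
  simpa using congrArg PySem.Dict.items h

-- ===== VERDICT (by name: the statement is the Claim_ definition above) =====
theorem parse_research_prompts_spec : Claim_equal_parse_research_prompts := by
  intro content _
  exact parse_research_prompts_spec_aux content
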